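-- pv_equiv track=rewrite | github.com/Kurokamori/Monsterify-Your-Website | website/linters/linter.py | _skip_string_forward
-- ===== SOURCE A (Python) =====
-- def _skip_string_forward(s: str, i: int) -> int:
--     quote = s[i]
--     i += 1
--     while i < len(s):
--         c = s[i]
--         if c == "\\":
--             i += 2
--             continue
--         if c == quote:
--             return i + 1
--         i += 1
--     return i
-- ===== SOURCE B (Python) =====
-- def _skip_string_forward(s: str, i: int) -> int:
--     quote = s[i]
--     n = len(s)
--     j = i + 1
--     while j < n:
--         b = s.find("\\", j)
--         q = s.find(quote, j)
--         if b != -1 and (q == -1 or b <= q):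
--             j = b + 2          # escape: jump past the backslash and the escaped character
--         elif q != -1:
--             return q + 1       # closing quote found
--         else:
--             return n           # only plain characters remain: unterminated
--     return j
-- ===== Notes on version B (the rewrite author's own statement) =====
-- stated objective: alternative
-- what changed: A inspects every character one by one in a Python-level while loop; B jumps over runs of plain characters by calling str.find for the next backslash or closing quote inside a standard while j < n scan, returning n when nothing is found.
-- intended difference: On negative in-range i, A keeps indexing with a negative position that Python wraps to the end of the string while still comparing it against len(s), returning an accidental end-relative result (e.g. 0 for ("''", -2)); B scans forward from the wrapped start position and returns the intended start-relative index (2 there). — e.g. on _skip_string_forward("''", -2): A returns 0, B returns 2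
import Mathlib
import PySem

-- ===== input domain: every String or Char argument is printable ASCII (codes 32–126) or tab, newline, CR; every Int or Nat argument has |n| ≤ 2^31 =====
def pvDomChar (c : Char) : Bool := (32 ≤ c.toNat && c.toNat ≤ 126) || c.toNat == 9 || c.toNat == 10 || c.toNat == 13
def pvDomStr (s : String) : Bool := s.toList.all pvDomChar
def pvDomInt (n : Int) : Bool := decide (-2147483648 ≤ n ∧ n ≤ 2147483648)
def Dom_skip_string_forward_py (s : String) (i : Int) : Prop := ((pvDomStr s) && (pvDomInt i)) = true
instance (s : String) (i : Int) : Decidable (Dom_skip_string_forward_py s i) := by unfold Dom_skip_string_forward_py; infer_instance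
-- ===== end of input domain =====

-- B replaces A's per-character while loop by a scan that jumps with str.find to the next
-- backslash or quote (the plain-character runs are skipped by the library search).

-- ===== PORT A =====
-- the while loop of A; fuel is an upper bound on the iteration count, never exhausted for the wrapper's argument
def pvALoop (cs : List Char) (quote : Char) : Nat → Int → Int
  | 0, i => i
  | fuel+1, i =>
    if i < (cs.length : Int) then
      match PySem.List.pyGet? cs i with
      | none => i  -- unreachable: inside the loop i is always a valid index once s[i] succeeded
      | some c =>
        if c = '\\' then pvALoop cs quote fuel (i + 2)
        else if c = quote then i + 1
        else pvALoop cs quote fuel (i + 1)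
    else i

def skip_string_forward_py (s : String) (i : Int) : Int :=
  match PySem.Str.pyGet? s i with
  | none => 0   -- Python raises IndexError here; outside Pre_
  | some quote => pvALoop s.toList quote (2 * s.toList.length + 2) (i + 1)

-- ===== PORT B =====
-- the while loop of B; each iteration does the two s.find calls of Source B
def pvBLoop (cs : List Char) (quote : Char) : Nat → Int → Int
  | 0, j => j
  | fuel+1, j =>
    if j < (cs.length : Int) then
      let b := PySem.Chars.findFrom cs ['\\'] j
      let q := PySem.Chars.findFrom cs [quote] j
      if b ≠ -1 ∧ (q = -1 ∨ b ≤ q) then pvBLoop cs quote fuel (b + 2)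
      else if q ≠ -1 then q + 1
      else (cs.length : Int)
    else j

def skip_string_forward_py_alt (s : String) (i : Int) : Int :=
  match PySem.Str.pyGet? s i with
  | none => 0   -- Python raises IndexError here; outside Pre_
  | some quote => pvBLoop s.toList quote (s.toList.length + 2) (i + 1)

-- ===== PRECONDITION & SPEC =====
-- Pre_: exactly the inputs on which Python's s[i] succeeds, i.e. A returns normally (IndexError otherwise)
def Pre_skip_string_forward_py (s : String) (i : Int) : Prop := PySem.Raise.InRange s.toList.length i
instance (s : String) (i : Int) : Decidable (Pre_skip_string_forward_py s i) := by unfold Pre_skip_string_forward_py; infer_instance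
def pvWitness_skip_string_forward_py : String × Int := ("'ab\\'c' + x", 0)

-- On negative in-range i, A's loop keeps indexing with a negative position (Python wraps it to the
-- END of the string) while still comparing it against len(s), returning an accidental end-relative
-- position; B scans forward from the wrapped start and returns the intended start-relative index.
def D_skip_string_forward_py (s : String) (i : Int) : Prop := i < 0
instance (s : String) (i : Int) : Decidable (D_skip_string_forward_py s i) := by unfold D_skip_string_forward_py; infer_instance

def Spec_skip_string_forward_py (s : String) (i : Int) (out : Int) : Prop := ¬ D_skip_string_forward_py s i → out = skip_string_forward_py_alt s i
instance (s : String) (i : Int) (out : Int) : Decidable (Spec_skip_string_forward_py s i out) := by unfold Spec_skip_string_forward_py; infer_instance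

def pvDiffWitness_skip_string_forward_py : String × Int := ("''", -2)
def pvDiffWitnessOut_skip_string_forward_py : Int × Int := (0, 2)

-- ===== CLAIM (what is proved, stated in full; the proofs are below) =====
def Claim_unchanged_skip_string_forward_py : Prop := ∀ (s : String) (i : Int), Dom_skip_string_forward_py s i → Pre_skip_string_forward_py s i → Spec_skip_string_forward_py s i (skip_string_forward_py s i)
def Claim_changed_skip_string_forward_py : Prop := Dom_skip_string_forward_py (pvDiffWitness_skip_string_forward_py.1) (pvDiffWitness_skip_string_forward_py.2) ∧ Pre_skip_string_forward_py (pvDiffWitness_skip_string_forward_py.1) (pvDiffWitness_skip_string_forward_py.2) ∧ D_skip_string_forward_py (pvDiffWitness_skip_string_forward_py.1) (pvDiffWitness_skip_string_forward_py.2) ∧ skip_string_forward_py (pvDiffWitness_skip_string_forward_py.1) (pvDiffWitness_skip_string_forward_py.2) = pvDiffWitnessOut_skip_string_forward_py.1 ∧ skip_string_forward_py_alt (pvDiffWitness_skip_string_forward_py.1) (pvDiffWitness_skip_string_forward_py.2) = pvDiffWitnessOut_skip_string_forward_py.2 ∧ pvDiffWitnessOut_skip_string_forward_py.1 ≠ 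pvDiffWitnessOut_skip_string_forward_py.2

-- ===== LEMMAS AND PROOFS =====

-- [c] is a prefix of cs.drop k exactly when cs[k]? = some c
lemma pvPrefixSingle (cs : List Char) (c : Char) (k : Nat) :
    [c] <+: cs.drop k ↔ cs[k]? = some c := by
  constructor
  · rintro ⟨t, ht⟩
    have h0 : (cs.drop k)[0]? = some c := by rw [← ht]; rfl
    rw [List.getElem?_drop] at h0
    simpa using h0
  · intro h
    have hk : k < cs.length := (List.getElem?_eq_some_iff.mp h).1
    rw [List.drop_eq_getElem_cons hk]
    have hck : cs[k] = c := by
      have := List.getElem?_eq_getElem hk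
      rw [h] at this; exact (Option.some.inj this).symm
    exact ⟨cs.drop (k+1), by simp [hck]⟩

-- findFrom returns -1 once the start is at or past the end of the string
lemma pvFindFromPastEnd (cs : List Char) (c : Char) (j : Int) (h : (cs.length : Int) ≤ j) :
    PySem.Chars.findFrom cs [c] j = -1 := by
  unfold PySem.Chars.findFrom
  simp only
  rw [if_neg (show ¬ j < 0 by omega)]
  by_cases hlt : (cs.length : Int) < j
  · rw [if_pos hlt]
  · rw [if_neg hlt]
    have hje : j = (cs.length : Int) := by omega
    subst hje
    simp only [Int.toNat_natCast, List.take_length, List.drop_length]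
    rw [show PySem.Chars.find ([] : List Char) [c] = -1 from
      (PySem.Chars.find_eq_neg_one_iff _ _).mpr (by simp [List.infix_iff_prefix_suffix])]
    rfl

-- findFrom finds the character at the start position itself
lemma pvFindFromHere (cs : List Char) (c : Char) (k : Nat) (hk : k < cs.length)
    (hc : cs[k]? = some c) : PySem.Chars.findFrom cs [c] (k : Int) = (k : Int) := by
  have hle : k ≤ cs.length := le_of_lt hk
  have hne : PySem.Chars.findFrom cs [c] (k : Int) ≠ -1 := fun h0 =>
    ((PySem.Chars.findFrom_natCast_eq_neg_one_iff cs [c] k hle).mp h0)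
      (((pvPrefixSingle cs c k).mpr hc).isInfix)
  obtain ⟨h1, h2, h3⟩ := PySem.Chars.findFrom_natCast_spec cs [c] k hle hne
  by_contra hneq
  have hgt : k < (PySem.Chars.findFrom cs [c] (k : Int)).toNat := by omega
  exact h3 k le_rfl hgt ((pvPrefixSingle cs c k).mpr hc)

-- skipping a non-matching character does not change the find result
lemma pvFindFromStep (cs : List Char) (c : Char) (k : Nat) (hk : k < cs.length)
    (hc : cs[k]? ≠ some c) :
    PySem.Chars.findFrom cs [c] (k : Int) = PySem.Chars.findFrom cs [c] ((k : Int) + 1) := by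
  have hle : k ≤ cs.length := le_of_lt hk
  have hle1 : k + 1 ≤ cs.length := hk
  have hcast : ((k : Int) + 1) = ((k + 1 : Nat) : Int) := by push_cast; ring
  rw [hcast]
  by_cases hn : PySem.Chars.findFrom cs [c] ((k + 1 : Nat) : Int) = -1
  · rw [hn]
    rw [PySem.Chars.findFrom_natCast_eq_neg_one_iff cs [c] k hle]
    rw [PySem.Chars.findFrom_natCast_eq_neg_one_iff cs [c] (k+1) hle1] at hn
    intro hcon
    apply hn
    rw [List.drop_eq_getElem_cons hk] at hcon
    rcases List.infix_cons_iff.mp hcon with h | h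
    · rcases (pvPrefixSingle cs c k).mp (by rw [List.drop_eq_getElem_cons hk]; exact h) with h'
      exact absurd h' hc
    · exact h
  · obtain ⟨g1, g2, g3⟩ := PySem.Chars.findFrom_natCast_spec cs [c] (k+1) hle1 hn
    have hinf : [c] <:+: cs.drop (k+1) := by
      by_contra hcon
      exact hn ((PySem.Chars.findFrom_natCast_eq_neg_one_iff cs [c] (k+1) hle1).mpr hcon)
    have hne : PySem.Chars.findFrom cs [c] (k : Int) ≠ -1 := by
      intro h0
      rw [PySem.Chars.findFrom_natCast_eq_neg_one_iff cs [c] k hle,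
        List.drop_eq_getElem_cons hk] at h0
      exact h0 (List.infix_cons hinf)
    obtain ⟨f1, f2, f3⟩ := PySem.Chars.findFrom_natCast_spec cs [c] k hle hne
    -- the two results are first matches from k and k+1; since cs[k] ≠ c they coincide
    have hfk : (PySem.Chars.findFrom cs [c] (k : Int)).toNat ≠ k := by
      intro hcon
      have := (pvPrefixSingle cs c k).mp (by rw [← hcon]; exact f2)
      exact hc this
    have hk1 : k + 1 ≤ (PySem.Chars.findFrom cs [c] (k : Int)).toNat := by omega
    have hA : ¬ (PySem.Chars.findFrom cs [c] ((k+1 : Nat) : Int)).toNat < (PySem.Chars.findFrom cs [c] (k : Int)).toNat :=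
      fun hlt => f3 _ (by omega) hlt g2
    have hB : ¬ (PySem.Chars.findFrom cs [c] (k : Int)).toNat < (PySem.Chars.findFrom cs [c] ((k+1 : Nat) : Int)).toNat :=
      fun hlt => g3 _ hk1 hlt f2
    omega

-- a successful find result is a valid index ≥ the (nonnegative) start, holding the character
lemma pvFindFromFacts (cs : List Char) (c : Char) (k : Nat) (hk : k ≤ cs.length)
    (hne : PySem.Chars.findFrom cs [c] (k : Int) ≠ -1) :
    (k : Int) ≤ PySem.Chars.findFrom cs [c] (k : Int) ∧
    PySem.Chars.findFrom cs [c] (k : Int) < cs.length ∧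
    cs[(PySem.Chars.findFrom cs [c] (k : Int)).toNat]? = some c := by
  obtain ⟨h1, h2, _⟩ := PySem.Chars.findFrom_natCast_spec cs [c] k hk hne
  have hc := (pvPrefixSingle cs c _).mp h2
  have hlt : (PySem.Chars.findFrom cs [c] (k : Int)).toNat < cs.length :=
    (List.getElem?_eq_some_iff.mp hc).1
  exact ⟨h1, by omega, hc⟩

-- the two loops agree from any nonnegative position, given enough fuel on both sides
lemma pvLoopEq (cs : List Char) (quote : Char) :
    ∀ (m : Nat) (k : Nat) (fa fb : Nat),
      cs.length + 2 - k ≤ m → cs.length + 2 - k ≤ fa → cs.length + 2 - k ≤ fb →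
      pvALoop cs quote fa (k : Int) = pvBLoop cs quote fb (k : Int) := by
  intro m
  induction m with
  | zero =>
    intro k fa fb hm _ _
    -- k ≥ len + 2 : both loops are past the end and return k
    have hk : (cs.length : Int) ≤ (k : Int) := by exact_mod_cast by omega
    cases fa <;> cases fb <;>
      simp [pvALoop, pvBLoop, not_lt.mpr hk]
  | succ m ih =>
    intro k fa fb hm hfa hfb
    by_cases hend : cs.length ≤ k
    · -- past the end: both return k
      have hk : (cs.length : Int) ≤ (k : Int) := by exact_mod_cast hend
      cases fa <;> cases fb <;>
        simp [pvALoop, pvBLoop, not_lt.mpr hk]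
    · push_neg at hend
      have hkc : ((k : Int) < (cs.length : Int)) := by exact_mod_cast hend
      have hget : cs[k]? = some cs[k] := List.getElem?_eq_getElem hend
      obtain ⟨fa', rfl⟩ : ∃ fa', fa = fa' + 1 := ⟨fa - 1, by omega⟩
      obtain ⟨fb', rfl⟩ : ∃ fb', fb = fb' + 1 := ⟨fb - 1, by omega⟩
      by_cases hbs : cs[k] = '\\'
      · -- backslash: both jump to k + 2
        have hb := pvFindFromHere cs '\\' k hend (by rw [hget, hbs])
        have hcond : PySem.Chars.findFrom cs [quote] (k : Int) = -1 ∨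
            (k : Int) ≤ PySem.Chars.findFrom cs [quote] (k : Int) := by
          by_cases hq : PySem.Chars.findFrom cs [quote] (k : Int) = -1
          · exact Or.inl hq
          · exact Or.inr (pvFindFromFacts cs quote k (le_of_lt hend) hq).1
        have hrec : pvALoop cs quote fa' ((k : Int) + 2) = pvBLoop cs quote fb' ((k : Int) + 2) := by
          have : ((k : Int) + 2) = ((k + 2 : Nat) : Int) := by push_cast; ring
          rw [this]
          exact ih (k + 2) fa' fb' (by omega) (by omega) (by omega)
        simp only [pvALoop, pvBLoop, if_pos hkc, PySem.List.pyGet?_natCast, hget, if_pos hbs, hb]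
        rw [if_pos ⟨by omega, hcond⟩]
        exact hrec
      · by_cases hqt : cs[k] = quote
        · -- closing quote: both return k + 1
          have hq := pvFindFromHere cs quote k hend (by rw [hget, hqt])
          have hbnot : ¬ (PySem.Chars.findFrom cs ['\\'] (k : Int) ≠ -1 ∧
              (PySem.Chars.findFrom cs [quote] (k : Int) = -1 ∨
               PySem.Chars.findFrom cs ['\\'] (k : Int) ≤ PySem.Chars.findFrom cs [quote] (k : Int))) := by
            rintro ⟨hbne, hor⟩
            obtain ⟨b1, b2, b3⟩ := pvFindFromFacts cs '\\' k (le_of_lt hend) hbne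
            have hbk : (PySem.Chars.findFrom cs ['\\'] (k : Int)).toNat ≠ k := by
              intro hcon
              rw [hcon, hget] at b3
              exact hbs (Option.some.inj b3)
            rcases hor with h | h
            · rw [hq] at h; omega
            · rw [hq] at h; omega
          simp only [pvALoop, pvBLoop, if_pos hkc, PySem.List.pyGet?_natCast, hget,
            if_neg hbs, if_pos hqt]
          rw [if_neg hbnot, if_pos (by rw [hq]; intro h; omega)]
          rw [hq]
        · -- ordinary character: A advances by one; B's finds are unchanged
          have hb := pvFindFromStep cs '\\' k hend (by rw [hget]; intro h; exact hbs (Option.some.inj h))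
          have hq := pvFindFromStep cs quote k hend (by rw [hget]; intro h; exact hqt (Option.some.inj h))
          have hrec : pvALoop cs quote fa' ((k : Int) + 1) = pvBLoop cs quote (fb' + 1) ((k : Int) + 1) := by
            have : ((k : Int) + 1) = ((k + 1 : Nat) : Int) := by push_cast; ring
            rw [this]
            exact ih (k + 1) fa' (fb' + 1) (by omega) (by omega) (by omega)
          simp only [pvALoop, if_pos hkc, PySem.List.pyGet?_natCast, hget, if_neg hbs, if_neg hqt]
          rw [hrec]
          -- pvBLoop at k+1 equals pvBLoop at k: the guard at k holds and neither search result changes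
          by_cases hend1 : (k : Int) + 1 < (cs.length : Int)
          · simp only [pvBLoop, if_pos hkc, if_pos hend1, hb, hq]
          · -- k + 1 = len: the left side returns k + 1; the right side finds nothing and returns len
            have hb1 : PySem.Chars.findFrom cs ['\\'] ((k : Int) + 1) = -1 :=
              pvFindFromPastEnd cs '\\' _ (by omega)
            have hq1 : PySem.Chars.findFrom cs [quote] ((k : Int) + 1) = -1 :=
              pvFindFromPastEnd cs quote _ (by omega)
            simp only [pvBLoop, if_neg hend1, if_pos hkc, hb, hq, hb1, hq1]
            simp only [ne_eq, not_true_eq_false, false_and, if_false]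
            omega

-- ===== VERDICT (by name: the statement is the Claim_ definition above) =====
theorem skip_string_forward_py_spec : Claim_unchanged_skip_string_forward_py := by
  intro s i _ hpre hnd
  unfold Pre_skip_string_forward_py PySem.Raise.InRange at hpre
  unfold D_skip_string_forward_py at hnd
  push_neg at hnd
  obtain ⟨k, rfl⟩ : ∃ k : Nat, i = (k : Int) := ⟨i.toNat, by omega⟩
  have hk : k < s.toList.length := by exact_mod_cast hpre.2
  unfold skip_string_forward_py skip_string_forward_py_alt
  have hget : PySem.Str.pyGet? s (k : Int) = some s.toList[k] := by
    simp [PySem.Str.pyGet?, PySem.Chars.pyGet?]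
  rw [hget]
  have : ((k : Int) + 1) = ((k + 1 : Nat) : Int) := by push_cast; ring
  rw [this]
  exact pvLoopEq s.toList s.toList[k] (s.toList.length + 2) (k + 1) _ _ (by omega) (by omega) (by omega)

theorem skip_string_forward_py_changed : Claim_changed_skip_string_forward_py := by
  unfold Claim_changed_skip_string_forward_py; decide
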